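-- pv_equiv track=rewrite | github.com/suhassrivats/Data-Structures-And-Algorithms-Implementation | Problems/Recursions/CodingBat_recursion_2.py | split53Helper
-- ===== SOURCE A (Python) =====
-- def split53Helper(nums, start, sum5, sum3):
--     if start >= len(nums):
--         return sum5 == sum3
--
--     value = nums[start]
--
--     if value % 5 == 0:
--         return split53Helper(nums, start+1, sum5+value, sum3)
--
--     elif value % 3 == 0:
--         return split53Helper(nums, start+1, sum5, sum3+value)
--
--     else:
--         return split53Helper(nums, start+1, sum5+value, sum3) or split53Helper(nums, start+1, sum5, sum3+value)
-- ===== SOURCE B (Python) =====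
-- def split53Helper(nums, start, sum5, sum3):
--     # Iterative subset-sum DP over the reachable values of (sum5 - sum3):
--     # multiples of 5 must go to sum5, multiples of 3 (not 5) to sum3, others either way.
--     diffs = {sum5 - sum3}
--     for i in range(start, len(nums)):
--         v = nums[i]
--         if v % 5 == 0:
--             diffs = {d + v for d in diffs}
--         elif v % 3 == 0:
--             diffs = {d - v for d in diffs}
--         else:
--             diffs = {d + v for d in diffs} | {d - v for d in diffs}
--     return 0 in diffs
-- ===== Notes on version B (the rewrite author's own statement) =====
-- stated objective: alternative
-- what changed: Replaced A's branching recursion by an iterative subset-sum style pass that carries the set of reachable values of sum5-sum3 across the indices and checks whether 0 is reachable at the end.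
import Mathlib
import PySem

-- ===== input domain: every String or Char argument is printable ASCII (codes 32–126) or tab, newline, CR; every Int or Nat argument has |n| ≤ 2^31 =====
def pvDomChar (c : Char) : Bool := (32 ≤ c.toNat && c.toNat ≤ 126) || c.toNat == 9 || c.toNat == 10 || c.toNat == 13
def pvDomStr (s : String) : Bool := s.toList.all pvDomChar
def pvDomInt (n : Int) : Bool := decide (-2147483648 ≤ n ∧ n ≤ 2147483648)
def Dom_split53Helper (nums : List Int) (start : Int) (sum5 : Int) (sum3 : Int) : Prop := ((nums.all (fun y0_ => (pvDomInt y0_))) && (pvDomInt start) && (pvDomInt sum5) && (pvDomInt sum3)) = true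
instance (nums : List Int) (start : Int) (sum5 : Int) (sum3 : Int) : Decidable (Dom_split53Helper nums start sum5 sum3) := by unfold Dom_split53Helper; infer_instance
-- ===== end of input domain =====

-- B replaces A's branching recursion by one iterative pass carrying the set of reachable
-- values of sum5 - sum3 (objective: alternative).

-- ===== PORT A =====
-- A's recursion on start is realised with a structural fuel ≥ the number of remaining
-- indices (a totality guard only; the `false` at fuel 0 is unreachable from the wrapper).
def split53Go (nums : List Int) (fuel : Nat) (start : Int) (sum5 : Int) (sum3 : Int) : Bool :=
  if start ≥ (nums.length : Int) then sum5 == sum3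
  else
    match fuel, PySem.List.pyGet? nums start with
    | 0, _ => false
    | _ + 1, none => false  -- IndexError in Python; excluded by Pre_split53Helper
    | fuel' + 1, some value =>
      if PySem.Int.mod value 5 == 0 then
        split53Go nums fuel' (start + 1) (sum5 + value) sum3
      else if PySem.Int.mod value 3 == 0 then
        split53Go nums fuel' (start + 1) sum5 (sum3 + value)
      else
        split53Go nums fuel' (start + 1) (sum5 + value) sum3 ||
        split53Go nums fuel' (start + 1) sum5 (sum3 + value)

def split53Helper (nums : List Int) (start : Int) (sum5 : Int) (sum3 : Int) : Bool :=
  split53Go nums ((nums.length : Int) - start).toNat start sum5 sum3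

-- ===== PORT B =====
def pvStep (nums : List Int) (diffs : PySem.Set Int) (i : Int) : PySem.Set Int :=
  let v := (PySem.List.pyGet? nums i).getD 0  -- in range for every i of the loop under Pre_
  if PySem.Int.mod v 5 == 0 then
    PySem.Set.ofList (diffs.map (· + v))
  else if PySem.Int.mod v 3 == 0 then
    PySem.Set.ofList (diffs.map (· - v))
  else
    PySem.Set.union (PySem.Set.ofList (diffs.map (· + v))) (diffs.map (· - v))

def split53Helper_alt (nums : List Int) (start : Int) (sum5 : Int) (sum3 : Int) : Bool :=
  let diffs :=
    (PySem.List.pyRange start (nums.length : Int) 1).foldl (pvStep nums)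
      (PySem.Set.ofList [sum5 - sum3])
  PySem.Set.contains diffs 0

-- ===== PRECONDITION & SPEC =====
-- Pre_ excludes exactly the inputs where Python A raises IndexError (start < -len(nums)).
def Pre_split53Helper (nums : List Int) (start : Int) (sum5 : Int) (sum3 : Int) : Prop :=
  -(nums.length : Int) ≤ start
instance (nums : List Int) (start : Int) (sum5 : Int) (sum3 : Int) : Decidable (Pre_split53Helper nums start sum5 sum3) := by unfold Pre_split53Helper; infer_instance
def pvWitness_split53Helper : List Int × Int × Int × Int := ([1, 5, 3], 0, 0, 0)

def Spec_split53Helper (nums : List Int) (start : Int) (sum5 : Int) (sum3 : Int) (out : Bool) : Prop := out = split53Helper_alt nums start sum5 sum3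
instance (nums : List Int) (start : Int) (sum5 : Int) (sum3 : Int) (out : Bool) : Decidable (Spec_split53Helper nums start sum5 sum3 out) := by unfold Spec_split53Helper; infer_instance

-- ===== CLAIM (what is proved, stated in full; the proofs are below) =====
def Claim_equal_split53Helper : Prop := ∀ (nums : List Int) (start : Int) (sum5 : Int) (sum3 : Int), Dom_split53Helper nums start sum5 sum3 → Pre_split53Helper nums start sum5 sum3 → Spec_split53Helper nums start sum5 sum3 (split53Helper nums start sum5 sum3)

-- ===== LEMMAS AND PROOFS =====

lemma beq_sub_zero (a b : Int) : (a == b) = (a - b == 0) := by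
  by_cases h : a = b
  · simp [h]
  · have h2 : ¬ (a - b = 0) := by omega
    simp [h, h2]

-- A's result depends on sum5 and sum3 only through their difference.
lemma split53_diff (nums : List Int) : ∀ (k : Nat) (start s5 s3 : Int),
    ((nums.length : Int) - start).toNat ≤ k →
    split53Go nums k start s5 s3 = split53Go nums k start (s5 - s3) 0 := by
  intro k
  induction k with
  | zero =>
    intro start s5 s3 hk
    have h : start ≥ (nums.length : Int) := by omega
    rw [split53Go.eq_def, split53Go.eq_def, if_pos h, if_pos h]
    exact beq_sub_zero s5 s3
  | succ n ih =>
    intro start s5 s3 hk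
    by_cases h : start ≥ (nums.length : Int)
    · rw [split53Go.eq_def, split53Go.eq_def, if_pos h, if_pos h]
      exact beq_sub_zero s5 s3
    · have hk' : ((nums.length : Int) - (start + 1)).toNat ≤ n := by omega
      rw [split53Go.eq_def, split53Go.eq_def, if_neg h, if_neg h]
      cases hv : PySem.List.pyGet? nums start with
      | none => rfl
      | some v =>
        dsimp only
        split_ifs with h5 h3
        · rw [ih (start+1) (s5+v) s3 hk', ih (start+1) (s5-s3+v) 0 hk']
          ring_nf
        · rw [ih (start+1) s5 (s3+v) hk', ih (start+1) (s5-s3) (0+v) hk']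
          ring_nf
        · rw [ih (start+1) (s5+v) s3 hk', ih (start+1) (s5-s3+v) 0 hk',
              ih (start+1) s5 (s3+v) hk', ih (start+1) (s5-s3) (0+v) hk']
          ring_nf

-- Invariant of B's fold: 0 is reachable from the set S iff A succeeds from some d ∈ S.
lemma split53_fold (nums : List Int) : ∀ (k : Nat) (start : Int),
    ((nums.length : Int) - start).toNat ≤ k →
    -(nums.length : Int) ≤ start →
    ∀ (S : PySem.Set Int),
      ((0 : Int) ∈ (PySem.List.pyRange start (nums.length : Int) 1).foldl (pvStep nums) S
        ↔ ∃ d ∈ S, split53Go nums k start d 0 = true) := by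
  intro k
  induction k with
  | zero =>
    intro start hk h0 S
    have h : (nums.length : Int) ≤ start := by omega
    rw [PySem.List.pyRange_one_eq_nil h]
    simp only [List.foldl_nil]
    constructor
    · intro hm
      refine ⟨0, hm, ?_⟩
      rw [split53Go.eq_def, if_pos (by omega)]
      simp
    · rintro ⟨d, hd, hA⟩
      rw [split53Go.eq_def, if_pos (by omega)] at hA
      have : d = 0 := by simpa using hA
      simpa [this] using hd
  | succ n ih =>
    intro start hk h0 S
    by_cases h : start ≥ (nums.length : Int)
    · rw [PySem.List.pyRange_one_eq_nil h]
      simp only [List.foldl_nil]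
      constructor
      · intro hm
        refine ⟨0, hm, ?_⟩
        rw [split53Go.eq_def, if_pos h]
        simp
      · rintro ⟨d, hd, hA⟩
        rw [split53Go.eq_def, if_pos h] at hA
        have : d = 0 := by simpa using hA
        simpa [this] using hd
    · have hlt : start < (nums.length : Int) := by omega
      have hk' : ((nums.length : Int) - (start + 1)).toNat ≤ n := by omega
      have h0' : -(nums.length : Int) ≤ start + 1 := by omega
      rw [PySem.List.pyRange_one_cons hlt]
      simp only [List.foldl_cons]
      rw [ih (start + 1) hk' h0' (pvStep nums S start)]
      obtain ⟨v, hv⟩ : ∃ v, PySem.List.pyGet? nums start = some v := by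
        cases hg : PySem.List.pyGet? nums start with
        | none =>
          exfalso
          rw [PySem.List.pyGet?_eq_none_iff] at hg
          exact hg (by simp only [PySem.Raise.InRange]; omega)
        | some v => exact ⟨v, rfl⟩
      have hAunf : ∀ d, split53Go nums (n + 1) start d 0 =
          (if PySem.Int.mod v 5 == 0 then split53Go nums n (start + 1) (d + v) 0
           else if PySem.Int.mod v 3 == 0 then split53Go nums n (start + 1) d (0 + v)
           else split53Go nums n (start + 1) (d + v) 0 ||
                split53Go nums n (start + 1) d (0 + v)) := by
        intro d
        rw [split53Go.eq_def, if_neg h, hv]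
      unfold pvStep
      simp only [hv, Option.getD_some]
      split_ifs with h5 h3
      · constructor
        · rintro ⟨d', hd', hA⟩
          rw [PySem.Set.mem_ofList, List.mem_map] at hd'
          obtain ⟨d, hd, rfl⟩ := hd'
          exact ⟨d, hd, by rw [hAunf d, if_pos h5]; exact hA⟩
        · rintro ⟨d, hd, hA⟩
          rw [hAunf d, if_pos h5] at hA
          exact ⟨d + v, by rw [PySem.Set.mem_ofList, List.mem_map]; exact ⟨d, hd, rfl⟩, hA⟩
      · constructor
        · rintro ⟨d', hd', hA⟩
          rw [PySem.Set.mem_ofList, List.mem_map] at hd'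
          obtain ⟨d, hd, rfl⟩ := hd'
          refine ⟨d, hd, ?_⟩
          rw [hAunf d, if_neg h5, if_pos h3,
              split53_diff nums n (start+1) d (0+v) hk']
          simpa using hA
        · rintro ⟨d, hd, hA⟩
          rw [hAunf d, if_neg h5, if_pos h3,
              split53_diff nums n (start+1) d (0+v) hk'] at hA
          refine ⟨d - v, by rw [PySem.Set.mem_ofList, List.mem_map]; exact ⟨d, hd, rfl⟩, ?_⟩
          simpa using hA
      · constructor
        · rintro ⟨d', hd', hA⟩
          rw [PySem.Set.mem_union] at hd'
          rcases hd' with hd' | hd'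
          · rw [PySem.Set.mem_ofList, List.mem_map] at hd'
            obtain ⟨d, hd, rfl⟩ := hd'
            refine ⟨d, hd, ?_⟩
            rw [hAunf d, if_neg h5, if_neg h3, Bool.or_eq_true]
            exact Or.inl hA
          · rw [List.mem_map] at hd'
            obtain ⟨d, hd, rfl⟩ := hd'
            refine ⟨d, hd, ?_⟩
            rw [hAunf d, if_neg h5, if_neg h3, Bool.or_eq_true]
            right
            rw [split53_diff nums n (start+1) d (0+v) hk']
            simpa using hA
        · rintro ⟨d, hd, hA⟩
          rw [hAunf d, if_neg h5, if_neg h3, Bool.or_eq_true] at hA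
          rcases hA with hA | hA
          · refine ⟨d + v, ?_, hA⟩
            rw [PySem.Set.mem_union]
            exact Or.inl (by rw [PySem.Set.mem_ofList, List.mem_map]; exact ⟨d, hd, rfl⟩)
          · refine ⟨d - v, ?_, ?_⟩
            · rw [PySem.Set.mem_union]
              exact Or.inr (by rw [List.mem_map]; exact ⟨d, hd, rfl⟩)
            · rw [split53_diff nums n (start+1) d (0+v) hk'] at hA
              simpa using hA

-- ===== VERDICT (by name: the statement is the Claim_ definition above) =====
theorem split53Helper_spec : Claim_equal_split53Helper := by
  intro nums start sum5 sum3 _hdom hpre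
  unfold Spec_split53Helper split53Helper_alt split53Helper
  have hfold := split53_fold nums (((nums.length : Int) - start).toNat) start le_rfl hpre
    (PySem.Set.ofList [sum5 - sum3])
  rw [split53_diff nums (((nums.length : Int) - start).toNat) start sum5 sum3 le_rfl]
  cases hA : split53Go nums (((nums.length : Int) - start).toNat) start (sum5 - sum3) 0 with
  | true =>
    have : (0 : Int) ∈ (PySem.List.pyRange start (nums.length : Int) 1).foldl (pvStep nums)
        (PySem.Set.ofList [sum5 - sum3]) := by
      rw [hfold]
      exact ⟨sum5 - sum3, by simp [PySem.Set.mem_ofList], hA⟩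
    rw [eq_comm, PySem.Set.contains_iff]
    exact this
  | false =>
    by_contra hc
    have hct : PySem.Set.contains
        ((PySem.List.pyRange start (nums.length : Int) 1).foldl (pvStep nums)
          (PySem.Set.ofList [sum5 - sum3])) 0 = true := by
      cases hx : PySem.Set.contains ((PySem.List.pyRange start (nums.length : Int) 1).foldl
        (pvStep nums) (PySem.Set.ofList [sum5 - sum3])) 0
      · exact absurd hx.symm hc
      · rfl
    rw [PySem.Set.contains_iff, hfold] at hct
    obtain ⟨d, hd, hAd⟩ := hct
    have : d = sum5 - sum3 := by simpa [PySem.Set.mem_ofList] using hd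
    rw [this, hA] at hAd
    exact Bool.false_ne_true hAd
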